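-- pv_equiv track=rewrite | github.com/shahrooz1997/LEGOstore | optimizer/utils.py | gen_cas_params
-- ===== SOURCE A (Python) =====
-- import math
--
-- def gen_cas_params(N, f, K=None, M=None, only_EC=False):
--     """ Generates all the possible values of n, k, q1, q2, q3, q4
--         for a given value of N = No. of DCs and f = availability target
--     """
--     quorum_params = []
--     quorum_params_append = quorum_params.append
--     if M is not None:
--         m = M
--         min_k = 2 if only_EC else 1
--         Ks = range(min_k, m)
--         if K is not None:
--             Ks = [K]
--
--         for k in Ks:
--             for q1 in range(math.ceil((m-k)/2), m-f+1):
--                 for q2 in range(math.ceil((m-k)/2), m-f+1):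
--                     for q3 in range(math.ceil((m-k)/2), m-f+1):
--                         for q4 in range(math.ceil((m-k)/2), m-f+1):
--                             if q1 + q3 > m and q1 + q4 > m and  q2 + q4 >= m + k and q4 > k:
--                                 quorum_params_append([m, k, q1, q2, q3, q4])
--
--     else:
--         for m in range(f+1, N+1):
--             k_range = K+1 if K is not None and K<m else m
--             min_k = 2 if only_EC else 1
--             for k in range(min_k, k_range):
--                 for q1 in range(math.ceil((m-k)/2), m-f+1):
--                     for q2 in range(math.ceil((m-k)/2), m-f+1):
--                         for q3 in range(math.ceil((m-k)/2), m-f+1):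
--                             for q4 in range(math.ceil((m-k)/2), m-f+1):
--                                 if q1 + q3 > m and q1 + q4 > m and  q2 + q4 >= m + k and q4 > k:
--                                     quorum_params_append([m, k, q1, q2, q3, q4])
--     return quorum_params
-- ===== SOURCE B (Python) =====
-- def gen_cas_params(N, f, K=None, M=None, only_EC=False):
--     """Same enumeration as A, but q3/q4 lower bounds are computed in closed form
--     and the qualifying (q3, q4) block is emitted with one comprehension, instead
--     of testing the constraint conjunction on every point of the full r^4 grid."""
--     out = []
--     min_k = 2 if only_EC else 1
--     if M is not None:
--         pairs = [(M, k) for k in ([K] if K is not None else range(min_k, M))]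
--     else:
--         pairs = [(m, k) for m in range(f + 1, N + 1)
--                  for k in range(min_k, (K + 1 if K is not None and K < m else m))]
--     for m, k in pairs:
--         lo = -((k - m) // 2)          # == ceil((m-k)/2)
--         hi = m - f + 1
--         for q1 in range(lo, hi):
--             q3s = range(max(lo, m + 1 - q1), hi)
--             q4_base = max(lo, m + 1 - q1, k + 1)
--             for q2 in range(lo, hi):
--                 q4s = range(max(q4_base, m + k - q2), hi)
--                 out += [[m, k, q1, q2, q3, q4] for q3 in q3s for q4 in q4s]
--     return out
-- ===== Notes on version B (the rewrite author's own statement) =====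
-- stated objective: alternative
-- what changed: Instead of scanning the full r^4 grid of (q1,q2,q3,q4) and testing the quorum constraints on every point, B computes the closed-form lower bounds for q3 and q4 from the constraints and emits only the qualifying (q3,q4) block per (q1,q2) (same lex order), with the (m,k) enumeration flattened into one pair list; intended as faster (it skips the failing grid points; measured 1.89x at the largest size both finished, but the probe could not confirm it overall), recorded as faster: none.
import Mathlib
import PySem

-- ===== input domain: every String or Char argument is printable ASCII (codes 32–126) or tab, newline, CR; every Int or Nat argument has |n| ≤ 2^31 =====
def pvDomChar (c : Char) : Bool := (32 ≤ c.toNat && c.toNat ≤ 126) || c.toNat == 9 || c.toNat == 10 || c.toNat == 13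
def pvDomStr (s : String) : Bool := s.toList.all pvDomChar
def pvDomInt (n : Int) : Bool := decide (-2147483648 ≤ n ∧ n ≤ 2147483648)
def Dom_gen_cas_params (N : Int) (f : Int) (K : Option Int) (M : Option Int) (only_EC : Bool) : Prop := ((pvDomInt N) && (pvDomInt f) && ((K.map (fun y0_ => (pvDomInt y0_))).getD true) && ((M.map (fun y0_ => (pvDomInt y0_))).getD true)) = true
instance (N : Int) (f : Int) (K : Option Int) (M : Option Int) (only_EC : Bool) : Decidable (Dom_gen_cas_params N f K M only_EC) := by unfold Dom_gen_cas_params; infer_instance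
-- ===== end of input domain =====

-- B replaces A's r^4 grid scan (test every (q1,q2,q3,q4)) by closed-form lower bounds for q3
-- and q4, emitting only qualifying values in the same lex order; objective: alternative.

-- ===== PORT A =====
-- math.ceil((m-k)/2): ceil(a/2) = -((-a)//2); exact, since the Python float division
-- is exact for |m-k| ≤ 2^32 (Dom bounds all ints by 2^31).
def pvCeilHalf (a : Int) : Int := -(PySem.Int.floordiv (-a) 2)

-- the quadruple q1..q4 loop body, textually identical in both branches of A
def casInner (m k f : Int) (acc : List (List Int)) : List (List Int) :=
  let lo := pvCeilHalf (m - k)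
  let hi := m - f + 1
  (PySem.List.pyRange lo hi 1).foldl (fun a1 q1 =>
    (PySem.List.pyRange lo hi 1).foldl (fun a2 q2 =>
      (PySem.List.pyRange lo hi 1).foldl (fun a3 q3 =>
        (PySem.List.pyRange lo hi 1).foldl (fun a4 q4 =>
          if q1 + q3 > m ∧ q1 + q4 > m ∧ q2 + q4 ≥ m + k ∧ q4 > k
          then a4 ++ [[m, k, q1, q2, q3, q4]] else a4) a3) a2) a1) acc

def gen_cas_params (N : Int) (f : Int) (K : Option Int) (M : Option Int) (only_EC : Bool) : List (List Int) :=
  match M with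
  | some m =>
    let min_k : Int := if only_EC then 2 else 1
    let Ks : List Int :=
      match K with
      | some kk => [kk]
      | none => PySem.List.pyRange min_k m 1
    Ks.foldl (fun acc k => casInner m k f acc) []
  | none =>
    (PySem.List.pyRange (f + 1) (N + 1) 1).foldl (fun acc m =>
      let k_range : Int :=
        match K with
        | some kk => if kk < m then kk + 1 else m
        | none => m
      let min_k : Int := if only_EC then 2 else 1
      (PySem.List.pyRange min_k k_range 1).foldl (fun acc k => casInner m k f acc) acc) []

-- ===== PORT B =====
-- B's inner block: q3/q4 from their closed-form lower bounds, one extend per (q1,q2)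
def casInnerAlt (m k f : Int) (acc : List (List Int)) : List (List Int) :=
  let lo := -(PySem.Int.floordiv (k - m) 2)
  let hi := m - f + 1
  (PySem.List.pyRange lo hi 1).foldl (fun a1 q1 =>
    let q3s := PySem.List.pyRange (max lo (m + 1 - q1)) hi 1
    let q4base := max (max lo (m + 1 - q1)) (k + 1)
    (PySem.List.pyRange lo hi 1).foldl (fun a2 q2 =>
      a2 ++ q3s.flatMap (fun q3 =>
        (PySem.List.pyRange (max q4base (m + k - q2)) hi 1).map
          (fun q4 => [m, k, q1, q2, q3, q4]))) a1) acc

def gen_cas_params_alt (N : Int) (f : Int) (K : Option Int) (M : Option Int) (only_EC : Bool) : List (List Int) :=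
  let min_k : Int := if only_EC then 2 else 1
  let pairs : List (Int × Int) :=
    match M with
    | some m =>
      (match K with
       | some kk => [kk]
       | none => PySem.List.pyRange min_k m 1).map (fun k => (m, k))
    | none =>
      (PySem.List.pyRange (f + 1) (N + 1) 1).flatMap (fun m =>
        (PySem.List.pyRange min_k
          (match K with
           | some kk => if kk < m then kk + 1 else m
           | none => m) 1).map (fun k => (m, k)))
  pairs.foldl (fun acc p => casInnerAlt p.1 p.2 f acc) []

-- ===== PRECONDITION & SPEC =====
def Spec_gen_cas_params (N : Int) (f : Int) (K : Option Int) (M : Option Int) (only_EC : Bool) (out : List (List Int)) : Prop := out = gen_cas_params_alt N f K M only_EC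
instance (N : Int) (f : Int) (K : Option Int) (M : Option Int) (only_EC : Bool) (out : List (List Int)) : Decidable (Spec_gen_cas_params N f K M only_EC out) := by unfold Spec_gen_cas_params; infer_instance

-- ===== CLAIM (what is proved, stated in full; the proofs are below) =====
def Claim_equal_gen_cas_params : Prop := ∀ (N : Int) (f : Int) (K : Option Int) (M : Option Int) (only_EC : Bool), Dom_gen_cas_params N f K M only_EC → Spec_gen_cas_params N f K M only_EC (gen_cas_params N f K M only_EC)

-- ===== LEMMAS AND PROOFS =====

theorem pv_foldl_ext {α β : Type} (f g : α → β → α) (l : List β) (a : α)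
    (h : ∀ a b, b ∈ l → f a b = g a b) : l.foldl f a = l.foldl g a := by
  induction l generalizing a with
  | nil => rfl
  | cons x xs ih =>
    simp only [List.foldl_cons]
    rw [h a x (List.mem_cons_self)]
    exact ih _ (fun a b hb => h a b (List.mem_cons_of_mem _ hb))

theorem pv_foldl_id {α β : Type} (l : List β) (a : α) : l.foldl (fun a _ => a) a = a := by
  induction l generalizing a <;> simp [*]

-- folding `if c ≤ q then f a q else a` over range [lo,hi) = folding f over [max lo c, hi)
theorem pv_foldl_pyRange_if_aux {α : Type} (f : α → Int → α) (c : Int) :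
    ∀ (n : Nat) (lo hi : Int), (hi - lo).toNat = n → ∀ (a : α),
      (PySem.List.pyRange lo hi 1).foldl (fun a q => if c ≤ q then f a q else a) a
        = (PySem.List.pyRange (max lo c) hi 1).foldl f a := by
  intro n
  induction n with
  | zero =>
    intro lo hi h a
    rw [PySem.List.pyRange_one_eq_nil (by omega), PySem.List.pyRange_one_eq_nil (by omega)]
    rfl
  | succ n ih =>
    intro lo hi h a
    have hlt : lo < hi := by omega
    rw [PySem.List.pyRange_one_cons hlt, List.foldl_cons]
    by_cases hc : c ≤ lo
    · have hmax : max lo c = lo := by omega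
      rw [hmax, PySem.List.pyRange_one_cons hlt, List.foldl_cons, if_pos hc,
        ih (lo + 1) hi (by omega) (f a lo)]
      have : max (lo + 1) c = lo + 1 := by omega
      rw [this]
    · rw [if_neg hc, ih (lo + 1) hi (by omega) a]
      have : max (lo + 1) c = max lo c := by omega
      rw [this]

theorem pv_foldl_pyRange_if {α : Type} (f : α → Int → α) (c lo hi : Int) (a : α) :
    (PySem.List.pyRange lo hi 1).foldl (fun a q => if c ≤ q then f a q else a) a
      = (PySem.List.pyRange (max lo c) hi 1).foldl f a :=
  pv_foldl_pyRange_if_aux f c (hi - lo).toNat lo hi rfl a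

theorem pv_foldl_flatMap {α β γ : Type} (g : β → List γ) (f : α → γ → α) (xs : List β) (a : α) :
    (xs.flatMap g).foldl f a = xs.foldl (fun a x => (g x).foldl f a) a := by
  induction xs generalizing a <;> simp [List.foldl_append, *]

theorem casInner_eq (m k f : Int) (acc : List (List Int)) :
    casInner m k f acc = casInnerAlt m k f acc := by
  unfold casInner casInnerAlt pvCeilHalf
  rw [neg_sub]
  refine pv_foldl_ext _ _ _ _ fun a1 q1 _ => ?_
  refine pv_foldl_ext _ _ _ _ fun a2 q2 _ => ?_
  -- rewrite the q3-level body of A: run the q4 loop on its qualifying values only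
  have hbody : ∀ (a3 : List (List Int)) (q3 : Int),
      (PySem.List.pyRange (-(PySem.Int.floordiv (k - m) 2)) (m - f + 1) 1).foldl (fun a4 q4 =>
          if q1 + q3 > m ∧ q1 + q4 > m ∧ q2 + q4 ≥ m + k ∧ q4 > k
          then a4 ++ [[m, k, q1, q2, q3, q4]] else a4) a3
        = if m + 1 - q1 ≤ q3 then
            (PySem.List.pyRange
                (max (max (max (-(PySem.Int.floordiv (k - m) 2)) (m + 1 - q1)) (k + 1)) (m + k - q2))
                (m - f + 1) 1).foldl (fun a4 q4 => a4 ++ [[m, k, q1, q2, q3, q4]]) a3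
          else a3 := by
    intro a3 q3
    by_cases h13 : m + 1 - q1 ≤ q3
    · rw [if_pos h13]
      have hstep : ∀ (a4 : List (List Int)) (q4 : Int), q4 ∈ PySem.List.pyRange (-(PySem.Int.floordiv (k - m) 2)) (m - f + 1) 1 →
          (if q1 + q3 > m ∧ q1 + q4 > m ∧ q2 + q4 ≥ m + k ∧ q4 > k
           then a4 ++ [[m, k, q1, q2, q3, q4]] else a4)
            = (if max (m + 1 - q1) (max (m + k - q2) (k + 1)) ≤ q4
               then a4 ++ [[m, k, q1, q2, q3, q4]] else a4) := by
        intro a4 q4 _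
        refine if_congr ?_ rfl rfl
        omega
      rw [pv_foldl_ext _ _ _ _ hstep,
        pv_foldl_pyRange_if (fun a4 q4 => a4 ++ [[m, k, q1, q2, q3, q4]])]
      have : max (-(PySem.Int.floordiv (k - m) 2)) (max (m + 1 - q1) (max (m + k - q2) (k + 1)))
          = max (max (max (-(PySem.Int.floordiv (k - m) 2)) (m + 1 - q1)) (k + 1)) (m + k - q2) := by
        omega
      rw [this]
    · rw [if_neg h13]
      have hstep : ∀ (a4 : List (List Int)) (q4 : Int), q4 ∈ PySem.List.pyRange (-(PySem.Int.floordiv (k - m) 2)) (m - f + 1) 1 →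
          (if q1 + q3 > m ∧ q1 + q4 > m ∧ q2 + q4 ≥ m + k ∧ q4 > k
           then a4 ++ [[m, k, q1, q2, q3, q4]] else a4) = a4 := by
        intro a4 q4 _
        rw [if_neg (by omega)]
      rw [pv_foldl_ext _ _ _ _ hstep, pv_foldl_id]
  rw [pv_foldl_ext _ _ _ _ (fun a3 q3 _ => hbody a3 q3),
    pv_foldl_pyRange_if _ (m + 1 - q1)]
  rw [pv_foldl_ext _
      (fun a3 q3 => a3 ++ (PySem.List.pyRange
          (max (max (max (-(PySem.Int.floordiv (k - m) 2)) (m + 1 - q1)) (k + 1)) (m + k - q2))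
          (m - f + 1) 1).map (fun q4 => [m, k, q1, q2, q3, q4])) _ _
      (fun a3 q3 _ => PySem.List.foldl_append_singleton_eq_map _ _ _),
    PySem.List.foldl_append_eq_flatMap]

-- ===== VERDICT (by name: the statement is the Claim_ definition above) =====
theorem gen_cas_params_spec : Claim_equal_gen_cas_params := by
  unfold Claim_equal_gen_cas_params
  intro N f K M only_EC _
  unfold Spec_gen_cas_params gen_cas_params gen_cas_params_alt
  cases M with
  | some m =>
    simp only [List.foldl_map]
    exact pv_foldl_ext _ _ _ _ fun acc k _ => casInner_eq m k f acc
  | none =>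
    rw [pv_foldl_flatMap]
    refine pv_foldl_ext _ _ _ _ fun acc m _ => ?_
    simp only [List.foldl_map]
    exact pv_foldl_ext _ _ _ _ fun acc k _ => casInner_eq m k f acc
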